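-- pv_equiv track=rewrite | github.com/coholic/algorithm | 이솔/프로그래머스/Level1/카드뭉치.py | solution
-- ===== SOURCE A (Python) =====
-- def solution(cards1, cards2, goal):
--     count1=0
--     count2=0
--     answer = ''
--     for i in goal:
--         if count1<len(cards1):
--             if i==cards1[count1]:
--                 count1+=1
--         if count2<len(cards2):
--             if i==cards2[count2]:
--                 count2+=1
--
--     if count1+count2==len(goal):
--         answer="Yes"
--     else:
--         answer="No"
--     return answer
-- ===== SOURCE B (Python) =====
-- def _match_count(deck, goal):
--     # greedy prefix-subsequence match: consume deck's front each time it equals the goal element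
--     it = iter(deck)
--     front = next(it, None)
--     cnt = 0
--     for g in goal:
--         if front is not None and g == front:
--             cnt += 1
--             front = next(it, None)
--     return cnt
--
-- def solution(cards1, cards2, goal):
--     return "Yes" if _match_count(cards1, goal) + _match_count(cards2, goal) == len(goal) else "No"
-- ===== Notes on version B (the rewrite author's own statement) =====
-- stated objective: simpler
-- what changed: Replaces the fused loop that advances two independent counters with a helper that greedily consumes one deck via an iterator against goal, called once per deck; the answer compares the sum of the two counts to len(goal).
import Mathlib
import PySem

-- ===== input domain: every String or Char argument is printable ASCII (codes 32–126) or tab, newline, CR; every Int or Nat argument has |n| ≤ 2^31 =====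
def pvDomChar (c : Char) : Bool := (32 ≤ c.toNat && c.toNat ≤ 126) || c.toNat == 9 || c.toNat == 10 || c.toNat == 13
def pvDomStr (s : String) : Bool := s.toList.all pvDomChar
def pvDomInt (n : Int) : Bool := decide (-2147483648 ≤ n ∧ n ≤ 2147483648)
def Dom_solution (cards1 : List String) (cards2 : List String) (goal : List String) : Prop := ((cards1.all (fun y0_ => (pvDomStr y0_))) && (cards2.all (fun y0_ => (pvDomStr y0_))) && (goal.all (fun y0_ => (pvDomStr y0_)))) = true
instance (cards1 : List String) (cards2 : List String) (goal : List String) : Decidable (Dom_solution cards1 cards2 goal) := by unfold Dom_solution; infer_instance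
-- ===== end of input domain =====

-- greedy prefix-subsequence helper called once per deck; objective: simpler decomposition, same cost.
-- B replaces A's fused loop (two independent counters advanced in one pass over goal) with a


-- ===== PORT A =====
-- one fold over goal; state = (count1, count2), each advanced independently as in A's nested ifs
def solStep (cards1 cards2 : List String) (s : Nat × Nat) (i : String) : Nat × Nat :=
  let c1 := if s.1 < cards1.length ∧ i = cards1.getD s.1 "" then s.1 + 1 else s.1
  let c2 := if s.2 < cards2.length ∧ i = cards2.getD s.2 "" then s.2 + 1 else s.2
  (c1, c2)

def solution (cards1 : List String) (cards2 : List String) (goal : List String) : String :=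
  let s := goal.foldl (solStep cards1 cards2) (0, 0)
  if s.1 + s.2 = goal.length then "Yes" else "No"

-- ===== PORT B =====
-- greedy count of the prefix-subsequence match of deck against goal (the iterator is the deck list itself)
def matchCount : List String → List String → Nat
  | _, [] => 0
  | [], _ :: gs => matchCount [] gs
  | d :: ds, g :: gs => if g = d then 1 + matchCount ds gs else matchCount (d :: ds) gs

def solution_alt (cards1 : List String) (cards2 : List String) (goal : List String) : String :=
  if matchCount cards1 goal + matchCount cards2 goal = goal.length then "Yes" else "No"

-- ===== PRECONDITION & SPEC =====
def Spec_solution (cards1 : List String) (cards2 : List String) (goal : List String) (out : String) : Prop := out = solution_alt cards1 cards2 goal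
instance (cards1 : List String) (cards2 : List String) (goal : List String) (out : String) : Decidable (Spec_solution cards1 cards2 goal out) := by unfold Spec_solution; infer_instance

-- ===== CLAIM (what is proved, stated in full; the proofs are below) =====
def Claim_equal_solution : Prop := ∀ (cards1 : List String) (cards2 : List String) (goal : List String), Dom_solution cards1 cards2 goal → Spec_solution cards1 cards2 goal (solution cards1 cards2 goal)

-- ===== LEMMAS AND PROOFS =====
-- single-deck version of A's counter update
def step1 (cards : List String) (c : Nat) (i : String) : Nat :=
  if c < cards.length ∧ i = cards.getD c "" then c + 1 else c

-- A's paired fold splits into two independent single-counter folds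
theorem foldl_solStep_eq (cards1 cards2 : List String) (goal : List String) (a b : Nat) :
    goal.foldl (solStep cards1 cards2) (a, b) =
      (goal.foldl (step1 cards1) a, goal.foldl (step1 cards2) b) := by
  induction goal generalizing a b with
  | nil => rfl
  | cons g gs ih => simp [List.foldl, solStep, step1, ih]

-- the single-counter fold starting at pointer c is c plus the greedy match of the remaining deck
theorem matchCount_nil_cons (g : String) (gs : List String) :
    matchCount [] (g :: gs) = matchCount [] gs := rfl

theorem matchCount_cons_cons (d : String) (ds : List String) (g : String) (gs : List String) :
    matchCount (d :: ds) (g :: gs) =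
      if g = d then 1 + matchCount ds gs else matchCount (d :: ds) gs := rfl

theorem foldl_step1_eq (cards goal : List String) (c : Nat) :
    goal.foldl (step1 cards) c = c + matchCount (cards.drop c) goal := by
  induction goal generalizing c with
  | nil => simp [matchCount]
  | cons g gs ih =>
    show List.foldl (step1 cards) (step1 cards c g) gs = c + matchCount (cards.drop c) (g :: gs)
    by_cases hlt : c < cards.length
    · have hdrop : cards.drop c = cards[c] :: cards.drop (c + 1) :=
        List.drop_eq_getElem_cons hlt
      have hgetD : cards.getD c "" = cards[c] := List.getD_eq_getElem cards "" hlt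
      rw [hdrop, matchCount_cons_cons]
      by_cases heq : g = cards[c]
      · rw [if_pos heq]
        have : step1 cards c g = c + 1 := by
          unfold step1; rw [if_pos ⟨hlt, by rw [hgetD]; exact heq⟩]
        rw [this, ih]
        omega
      · rw [if_neg heq]
        have : step1 cards c g = c := by
          unfold step1
          rw [if_neg (by rw [hgetD]; exact fun h => heq h.2)]
        rw [this, ih, hdrop]
    · have hdrop : cards.drop c = [] := List.drop_eq_nil_of_le (by omega)
      have hs : step1 cards c g = c := by
        unfold step1; rw [if_neg (fun h => hlt h.1)]
      rw [hs, ih, hdrop, matchCount_nil_cons]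

-- ===== VERDICT (by name: the statement is the Claim_ definition above) =====
theorem solution_spec : Claim_equal_solution := by
  intro cards1 cards2 goal _
  unfold Spec_solution solution solution_alt
  rw [foldl_solStep_eq, foldl_step1_eq, foldl_step1_eq]
  simp
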